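-- pv_equiv track=rewrite | github.com/Janoxigen/Eye-Scanner | theBackrooms/Cypher_MDA_Analyzer.py | __generate_pairings_from_List
-- ===== SOURCE A (Python) =====
-- def __generate_pairings_from_List(Tuplelist: list) -> list:
--     """
--     IMPORTANT FUNCTION
--     used in ingest_new_Tuple_Equality().
--
--     Generates a List containing all possible pairings of the given Tuplelists Entries.
--     (only pairings where A!=B)
--     (only ONCE each pairing, to improve runtime)
--     """
--     resultList = []
--     if Tuplelist.__len__() <2:
--         raise IndexError("Not enough Tuples in EC.")
--     for A in Tuplelist:
--         for B in Tuplelist: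
--             if A==B:
--                 continue
--             newPairing = (A,B)
--             if newPairing not in resultList:
--                 resultList.append(newPairing)
--     return resultList
-- ===== SOURCE B (Python) =====
-- def __generate_pairings_from_List(Tuplelist: list) -> list:
--     """
--     Two-phase rewrite: dedup first (first-occurrence order), then generate the
--     cross product of distinct values directly, with no per-pair membership scan.
--     """
--     if len(Tuplelist) < 2:
--         raise IndexError("Not enough Tuples in EC.")
--     distinct = list(dict.fromkeys(Tuplelist))
--     return [(x, y) for x in distinct for y in distinct if x != y]
-- ===== Notes on version B (the rewrite author's own statement) =====
-- stated objective: faster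
-- what changed: replaces the nested scan over the raw list with a per-pair 'not in resultList' membership check by a one-pass first-occurrence dedup followed by a direct nested product over the distinct values (no membership checks at all)
import Mathlib
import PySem

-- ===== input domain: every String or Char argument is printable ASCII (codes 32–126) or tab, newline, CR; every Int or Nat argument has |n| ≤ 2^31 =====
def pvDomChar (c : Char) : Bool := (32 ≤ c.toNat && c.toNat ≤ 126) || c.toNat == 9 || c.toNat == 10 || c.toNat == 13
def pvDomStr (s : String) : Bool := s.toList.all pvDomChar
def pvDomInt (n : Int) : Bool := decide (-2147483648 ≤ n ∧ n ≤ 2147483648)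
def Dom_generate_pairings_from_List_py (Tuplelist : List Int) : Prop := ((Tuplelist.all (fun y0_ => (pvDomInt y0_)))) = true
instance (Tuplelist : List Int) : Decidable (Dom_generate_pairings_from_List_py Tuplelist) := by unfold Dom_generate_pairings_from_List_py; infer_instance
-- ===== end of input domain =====

-- B replaces A's per-pair membership-checked nested scan by a first-occurrence dedup
-- followed by a direct nested product over the distinct values (objective: faster).

-- ===== PORT A =====
-- inner-loop body of A: 'if A==B: continue; newPairing=(A,B); if newPairing not in resultList: resultList.append(newPairing)'
def pvStepA (x : Int) (r : List (Int × Int)) (y : Int) : List (Int × Int) :=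
  if x = y then r else if (x, y) ∈ r then r else r ++ [(x, y)]

def generate_pairings_from_List_py (Tuplelist : List Int) : List (Int × Int) :=
  if Tuplelist.length < 2 then []  -- Python raises IndexError here; excluded by Pre_
  else Tuplelist.foldl (fun acc x => Tuplelist.foldl (pvStepA x) acc) []

-- ===== PORT B =====
-- port of Source B's 'list(dict.fromkeys(Tuplelist))' (first-occurrence distinct values)
def pvDedupFO : List Int → List Int
  | [] => []
  | a :: l => a :: pvDedupFO (l.filter (fun b => decide (b ≠ a)))
termination_by l => l.length
decreasing_by
  simp only [List.length_cons, Nat.lt_succ_iff]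
  simpa using List.length_filter_le _ l.attach

def generate_pairings_from_List_py_alt (Tuplelist : List Int) : List (Int × Int) :=
  if Tuplelist.length < 2 then []  -- Source B raises IndexError here too; excluded by Pre_
  else
    let d := pvDedupFO Tuplelist
    d.flatMap (fun x => (d.filter (fun y => decide (x ≠ y))).map (fun y => (x, y)))

-- ===== PRECONDITION & SPEC =====
-- Pre_ excludes lists of length < 2, on which the Python A (and Source B) raise IndexError.
def Pre_generate_pairings_from_List_py (Tuplelist : List Int) : Prop :=
  2 ≤ Tuplelist.length
instance (Tuplelist : List Int) : Decidable (Pre_generate_pairings_from_List_py Tuplelist) := by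
  unfold Pre_generate_pairings_from_List_py; infer_instance

def pvWitness_generate_pairings_from_List_py : List Int := [1, 2, 1, 3]

def Spec_generate_pairings_from_List_py (Tuplelist : List Int) (out : List (Int × Int)) : Prop := out = generate_pairings_from_List_py_alt Tuplelist
instance (Tuplelist : List Int) (out : List (Int × Int)) : Decidable (Spec_generate_pairings_from_List_py Tuplelist out) := by unfold Spec_generate_pairings_from_List_py; infer_instance

-- ===== CLAIM (what is proved, stated in full; the proofs are below) =====
def Claim_equal_generate_pairings_from_List_py : Prop := ∀ (Tuplelist : List Int), Dom_generate_pairings_from_List_py Tuplelist → Pre_generate_pairings_from_List_py Tuplelist → Spec_generate_pairings_from_List_py Tuplelist (generate_pairings_from_List_py Tuplelist)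

-- ===== LEMMAS AND PROOFS =====

lemma pvDedupFO_nil : pvDedupFO [] = [] := by rw [pvDedupFO.eq_def]

lemma pvDedupFO_cons (a : Int) (l : List Int) :
    pvDedupFO (a :: l) = a :: pvDedupFO (l.filter (fun b => decide (b ≠ a))) := by
  rw [pvDedupFO.eq_def]

-- recursion principle following pvDedupFO's call structure (clean IH)
lemma pvDedupFO_rec (motive : List Int → Prop) (h0 : motive [])
    (h1 : ∀ a l, motive (l.filter (fun b => decide (b ≠ a))) → motive (a :: l)) :
    ∀ l, motive l := by
  have key : ∀ (n : ℕ) (l : List Int), l.length ≤ n → motive l := by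
    intro n
    induction n with
    | zero =>
        intro l h
        cases l with
        | nil => exact h0
        | cons a l => simp at h
    | succ n ih =>
        intro l h
        cases l with
        | nil => exact h0
        | cons a l =>
            exact h1 a l (ih _ (le_trans (List.length_filter_le _ _)
              (Nat.succ_le_succ_iff.mp h)))
  exact fun l => key l.length l le_rfl

lemma mem_pvDedupFO {b : Int} : ∀ {l : List Int}, b ∈ pvDedupFO l ↔ b ∈ l := by
  intro l
  induction l using pvDedupFO_rec with
  | h0 => simp [pvDedupFO_nil]
  | h1 a l ih =>
      rw [pvDedupFO_cons]
      simp only [List.mem_cons, ih, List.mem_filter, decide_eq_true_eq]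
      by_cases hba : b = a <;> simp [hba]

lemma pvDedupFO_filter (p : Int → Bool) :
    ∀ (l : List Int), pvDedupFO (l.filter p) = (pvDedupFO l).filter p := by
  intro l
  induction l using pvDedupFO_rec with
  | h0 => simp [pvDedupFO_nil]
  | h1 a l ih =>
      by_cases hpa : p a = true
      · have h1 : (a :: l).filter p = a :: l.filter p := by simp [List.filter_cons, hpa]
        rw [h1, pvDedupFO_cons, pvDedupFO_cons]
        have h2 : (l.filter p).filter (fun b => decide (b ≠ a))
            = (l.filter (fun b => decide (b ≠ a))).filter p := by
          rw [List.filter_filter, List.filter_filter]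
          exact List.filter_congr (fun b _ => by by_cases hb : b = a <;> simp [hb])
        rw [h2, ih]
        simp [List.filter_cons, hpa]
      · have h1 : (a :: l).filter p = l.filter p := by simp [List.filter_cons, hpa]
        have h2 : l.filter p = (l.filter (fun b => decide (b ≠ a))).filter p := by
          rw [List.filter_filter]
          exact (List.filter_congr (fun b _ => by
            by_cases hb : b = a
            · subst hb; simp [hpa]
            · simp [hb])).symm
        rw [h1, h2, ih]
        simp [pvDedupFO_cons, List.filter_cons, hpa]

-- characterization of A's inner loop: it appends, in first-occurrence order, exactly
-- the pairs (x, y) with y ∈ l, y ≠ x and (x, y) not already in the accumulator.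
lemma inner_eq (x : Int) :
    ∀ (l : List Int) (acc : List (Int × Int)),
      l.foldl (pvStepA x) acc =
        acc ++ (pvDedupFO (l.filter (fun y => decide (¬(x = y) ∧ (x, y) ∉ acc)))).map
          (fun y => (x, y)) := by
  intro l
  induction l with
  | nil => intro acc; simp [pvDedupFO_nil]
  | cons y l ih =>
      intro acc
      rw [List.foldl_cons]
      by_cases hxy : x = y
      · have : pvStepA x acc y = acc := by simp [pvStepA, hxy]
        rw [this, ih]
        simp [List.filter_cons, hxy]
      · by_cases hmem : (x, y) ∈ acc
        · have : pvStepA x acc y = acc := by simp [pvStepA, hxy, hmem]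
          rw [this, ih]
          have : (y :: l).filter (fun y' => decide (¬(x = y') ∧ (x, y') ∉ acc))
              = l.filter (fun y' => decide (¬(x = y') ∧ (x, y') ∉ acc)) := by
            simp [List.filter_cons, hxy, hmem]
          rw [this]
        · have hstep : pvStepA x acc y = acc ++ [(x, y)] := by simp [pvStepA, hxy, hmem]
          rw [hstep, ih]
          have hfc : (y :: l).filter (fun y' => decide (¬(x = y') ∧ (x, y') ∉ acc))
              = y :: l.filter (fun y' => decide (¬(x = y') ∧ (x, y') ∉ acc)) := by
            simp [List.filter_cons, hxy, hmem]
          have hf' : l.filter (fun y' => decide (¬(x = y') ∧ (x, y') ∉ acc ++ [(x, y)]))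
              = (l.filter (fun y' => decide (¬(x = y') ∧ (x, y') ∉ acc))).filter
                  (fun y' => decide (y' ≠ y)) := by
            rw [List.filter_filter]
            exact List.filter_congr (fun y' _ => by
              by_cases h1 : x = y' <;> by_cases h2 : (x, y') ∈ acc <;>
                by_cases h3 : y' = y <;> simp_all [Prod.ext_iff])
          rw [hf', hfc, pvDedupFO_cons]
          simp

-- B's value after the outer loop has consumed the prefix P (of the full list T)
def pvOut (T P : List Int) : List (Int × Int) :=
  (pvDedupFO P).flatMap
    (fun x => ((pvDedupFO T).filter (fun y => decide (x ≠ y))).map (fun y => (x, y)))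

lemma fst_mem_of_mem_pvOut {T P : List Int} {a b : Int} (h : (a, b) ∈ pvOut T P) : a ∈ P := by
  rcases List.mem_flatMap.1 h with ⟨x, hx, hab⟩
  rcases List.mem_map.1 hab with ⟨y, _, hy⟩
  cases hy
  exact mem_pvDedupFO.1 hx

lemma mem_pvOut_of {T P : List Int} {x y : Int} (hx : x ∈ P) (hy : y ∈ T) (hne : x ≠ y) :
    (x, y) ∈ pvOut T P := by
  refine List.mem_flatMap.2 ⟨x, mem_pvDedupFO.2 hx, ?_⟩
  exact List.mem_map.2 ⟨y, List.mem_filter.2 ⟨mem_pvDedupFO.2 hy, by simpa using hne⟩, rfl⟩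

lemma pvDedupFO_append_singleton (x : Int) :
    ∀ (P : List Int), pvDedupFO (P ++ [x]) = if x ∈ P then pvDedupFO P else pvDedupFO P ++ [x] := by
  intro P
  induction P using pvDedupFO_rec with
  | h0 => simp [pvDedupFO_nil, pvDedupFO_cons]
  | h1 a P ih =>
      by_cases hxa : x = a
      · subst hxa
        have : (P ++ [x]).filter (fun b => decide (b ≠ x)) = P.filter (fun b => decide (b ≠ x)) := by
          simp [List.filter_append]
        simp [pvDedupFO_cons, this]
      · have hfa : (P ++ [x]).filter (fun b => decide (b ≠ a))
            = P.filter (fun b => decide (b ≠ a)) ++ [x] := by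
          simp [List.filter_append, hxa]
        have hmemiff : (x ∈ P.filter (fun b => decide (b ≠ a))) ↔ x ∈ P := by
          simp [List.mem_filter, hxa]
        rw [show ((a :: P) ++ [x]) = a :: (P ++ [x]) from rfl, pvDedupFO_cons, hfa, ih]
        by_cases hxP : x ∈ P
        · simp [pvDedupFO_cons, hmemiff, hxP, List.mem_cons, hxa]
        · simp [pvDedupFO_cons, hmemiff, hxP, List.mem_cons, hxa]

lemma outer_step (T P : List Int) (x : Int) :
    T.foldl (pvStepA x) (pvOut T P) = pvOut T (P ++ [x]) := by
  rw [inner_eq]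
  by_cases hxP : x ∈ P
  · have hfil : T.filter (fun y => decide (¬(x = y) ∧ (x, y) ∉ pvOut T P)) = [] := by
      rw [List.filter_eq_nil_iff]
      intro y hy
      by_cases hxy : x = y
      · simp [hxy]
      · simp [hxy, mem_pvOut_of hxP hy hxy]
    rw [hfil]
    simp [pvOut, pvDedupFO_append_singleton, pvDedupFO_nil, hxP]
  · have hfil : T.filter (fun y => decide (¬(x = y) ∧ (x, y) ∉ pvOut T P))
        = T.filter (fun y => decide (x ≠ y)) := by
      exact List.filter_congr (fun y _ => by
        by_cases hxy : x = y
        · simp [hxy]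
        · simp only [decide_eq_decide]
          constructor
          · intro h; exact hxy
          · intro _; exact ⟨hxy, fun hmem => hxP (fst_mem_of_mem_pvOut hmem)⟩)
    rw [hfil, pvDedupFO_filter]
    simp [pvOut, pvDedupFO_append_singleton, hxP]

lemma foldl_pvOut (T : List Int) :
    ∀ (S P : List Int),
      S.foldl (fun acc x => T.foldl (pvStepA x) acc) (pvOut T P) = pvOut T (P ++ S) := by
  intro S
  induction S with
  | nil => intro P; simp
  | cons x S ih =>
      intro P
      rw [List.foldl_cons, outer_step T P x, ih]
      simp

-- ===== VERDICT (by name: the statement is the Claim_ definition above) =====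
theorem generate_pairings_from_List_py_spec : Claim_equal_generate_pairings_from_List_py := by
  intro T _ _
  unfold Spec_generate_pairings_from_List_py
  unfold generate_pairings_from_List_py generate_pairings_from_List_py_alt
  by_cases hlen : T.length < 2
  · simp [hlen]
  · simp only [hlen, if_false]
    have h0 : pvOut T [] = [] := by simp [pvOut, pvDedupFO_nil]
    have := foldl_pvOut T T []
    rw [h0] at this
    rw [this]
    rfl
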